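-- pv_equiv track=rewrite | github.com/palbiez/openpose_skeleton_generator | core/pose_attributes.py | unique_attributes
-- ===== SOURCE A (Python) =====
-- from typing import Dict, Iterable, List, Optional, Sequence, Tuple
--
-- ATTRIBUTE_ORDER = [
--     "hands_up",
--     "hand_up",
--     "left_hand_up",
--     "right_hand_up",
--     "hand_near_face",
--     "left_hand_near_face",
--     "right_hand_near_face",
--     "thinking",
--     "hand_on_hip",
--     "left_hand_on_hip",
--     "right_hand_on_hip",
--     "arms_crossed",
--     "arms_out",
--     "legs_crossed",
--     "legs_open",
--     "legs_closed",
--     "one_knee_high",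
--     "both_knees_level",
--     "torso_lean",
--     "torso_lean_left",
--     "torso_lean_right",
--     "head_down",
--     "head_tilted",
--     "salute",
--     "waving",
--     "squatting",
--     "all_fours",
-- ]
--
-- def normalize_attribute(value) -> str:
--     return str(value).strip().lower().replace(" ", "_").replace("-", "_")
--
-- def unique_attributes(values: Iterable[str]) -> List[str]:
--     seen = set()
--     attrs = []
--     for value in values:
--         attr = normalize_attribute(value)
--         if attr and attr not in seen:
--             attrs.append(attr)
--             seen.add(attr)
--     return sorted(attrs, key=lambda item: ATTRIBUTE_ORDER.index(item) if item in ATTRIBUTE_ORDER else 999)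
-- ===== SOURCE B (Python) =====
-- # B: no sort -- ordered dedup via dict.fromkeys, then one scan over ATTRIBUTE_ORDER
-- # for the known attributes followed by the leftovers in first-seen order.
-- ATTRIBUTE_ORDER = [
--     "hands_up",
--     "hand_up",
--     "left_hand_up",
--     "right_hand_up",
--     "hand_near_face",
--     "left_hand_near_face",
--     "right_hand_near_face",
--     "thinking",
--     "hand_on_hip",
--     "left_hand_on_hip",
--     "right_hand_on_hip",
--     "arms_crossed",
--     "arms_out",
--     "legs_crossed",
--     "legs_open",
--     "legs_closed",
--     "one_knee_high",
--     "both_knees_level",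
--     "torso_lean",
--     "torso_lean_left",
--     "torso_lean_right",
--     "head_down",
--     "head_tilted",
--     "salute",
--     "waving",
--     "squatting",
--     "all_fours",
-- ]
--
-- def normalize_attribute(value) -> str:
--     return str(value).strip().lower().replace(" ", "_").replace("-", "_")
--
-- def unique_attributes(values):
--     attrs = dict.fromkeys(
--         a for a in (normalize_attribute(v) for v in values) if a)
--     known = [a for a in ATTRIBUTE_ORDER if a in attrs]
--     unknown = [a for a in attrs if a not in ATTRIBUTE_ORDER]
--     return known + unknown
-- ===== Notes on version B (the rewrite author's own statement) =====
-- stated objective: alternative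
-- what changed: B drops the sort entirely: after the same normalize+dedup pass it emits the attributes found in ATTRIBUTE_ORDER by one scan of that table, then the unknown attributes in first-seen order, matching A's stable sort by table index with ties at 999.
import Mathlib
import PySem

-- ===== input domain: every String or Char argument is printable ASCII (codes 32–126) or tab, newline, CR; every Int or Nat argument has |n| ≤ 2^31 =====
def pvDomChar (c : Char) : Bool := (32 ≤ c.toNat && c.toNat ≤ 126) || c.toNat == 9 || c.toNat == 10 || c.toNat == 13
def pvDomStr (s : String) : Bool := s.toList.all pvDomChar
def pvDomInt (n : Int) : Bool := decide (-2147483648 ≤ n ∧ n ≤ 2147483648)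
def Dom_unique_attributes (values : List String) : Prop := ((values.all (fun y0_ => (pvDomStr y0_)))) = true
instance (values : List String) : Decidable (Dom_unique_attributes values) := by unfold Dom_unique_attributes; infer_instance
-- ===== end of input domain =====

-- B replaces A's sort by ATTRIBUTE_ORDER.index with an ordered dedup followed by one
-- scan of ATTRIBUTE_ORDER plus the leftovers in first-seen order (no sort, no index).

-- ===== PORT A =====
def ATTRIBUTE_ORDER : List String := [
  "hands_up", "hand_up", "left_hand_up", "right_hand_up", "hand_near_face",
  "left_hand_near_face", "right_hand_near_face", "thinking", "hand_on_hip",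
  "left_hand_on_hip", "right_hand_on_hip", "arms_crossed", "arms_out",
  "legs_crossed", "legs_open", "legs_closed", "one_knee_high", "both_knees_level",
  "torso_lean", "torso_lean_left", "torso_lean_right", "head_down", "head_tilted",
  "salute", "waving", "squatting", "all_fours"]

-- str(value) is the identity here: values are already strings.
def normalize_attribute (value : String) : String :=
  PySem.Str.replace (PySem.Str.replace (PySem.Str.lower (PySem.Str.strip value)) " " "_") "-" "_"

-- the sort key: ATTRIBUTE_ORDER.index(item) if item in ATTRIBUTE_ORDER else 999
def uaKey (item : String) : Int :=
  if item ∈ ATTRIBUTE_ORDER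
  then (((PySem.List.index? ATTRIBUTE_ORDER item).getD 0 : Nat) : Int)
  else 999

-- the body of A's for-loop: (seen, attrs) updated by one value
def uaStep (st : PySem.Set String × List String) (value : String) :
    PySem.Set String × List String :=
  let attr := normalize_attribute value
  if attr ≠ "" ∧ attr ∉ st.1 then (PySem.Set.add st.1 attr, st.2 ++ [attr]) else st

def unique_attributes (values : List String) : List String :=
  let st := values.foldl uaStep (PySem.Set.empty, [])
  PySem.List.sorted st.2 uaKey

-- ===== PORT B =====
def unique_attributes_alt (values : List String) : List String :=
  let attrs := PySem.List.dedup
    ((values.map normalize_attribute).filter (fun a => decide (a ≠ "")))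
  ATTRIBUTE_ORDER.filter (fun a => decide (a ∈ attrs))
    ++ attrs.filter (fun a => decide (a ∉ ATTRIBUTE_ORDER))

-- ===== PRECONDITION & SPEC =====
def Spec_unique_attributes (values : List String) (out : List String) : Prop := out = unique_attributes_alt values
instance (values : List String) (out : List String) : Decidable (Spec_unique_attributes values out) := by unfold Spec_unique_attributes; infer_instance

-- ===== CLAIM (what is proved, stated in full; the proofs are below) =====
def Claim_equal_unique_attributes : Prop := ∀ (values : List String), Dom_unique_attributes values → Spec_unique_attributes values (unique_attributes values)

-- ===== LEMMAS AND PROOFS =====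

-- facts about the fixed priority table
theorem ord_nodup : ATTRIBUTE_ORDER.Nodup := by decide

theorem ord_pairwise : ATTRIBUTE_ORDER.Pairwise (fun a b => uaKey a < uaKey b) := by decide

theorem key_lt_of_mem : ∀ x ∈ ATTRIBUTE_ORDER, uaKey x < 999 := by decide

theorem key_of_not_mem {x : String} (h : x ∉ ATTRIBUTE_ORDER) : uaKey x = 999 := by
  simp [uaKey, h]

-- insertBy facts for the two ends of the bucket structure
theorem insertBy_cons {α : Type} (before : α → α → Bool) (x y : α) (ys : List α) :
    PySem.List.insertBy before x (y :: ys)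
      = if before x y then x :: y :: ys else y :: PySem.List.insertBy before x ys := rfl

theorem insertBy_front {α : Type} (before : α → α → Bool) (x : α) (ys : List α)
    (h : ∀ y ∈ ys, before x y = true) :
    PySem.List.insertBy before x ys = x :: ys := by
  cases ys with
  | nil => rfl
  | cons y ys => rw [insertBy_cons, if_pos (h y (by simp))]

theorem insertBy_append {α : Type} (before : α → α → Bool) (x : α) (K U : List α)
    (h : ∀ u ∈ U, before x u = true) :
    PySem.List.insertBy before x (K ++ U) = PySem.List.insertBy before x K ++ U := by
  induction K with
  | nil => rw [List.nil_append, insertBy_front before x U h]; rfl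
  | cons k K ih =>
    rw [List.cons_append, insertBy_cons, insertBy_cons]
    by_cases hk : before x k = true
    · simp [hk]
    · simp only [Bool.not_eq_true] at hk
      simp [hk, ih]

-- inserting a table element into a table-filter keeps the table order
theorem insertBy_filter (p : List String) (x : String) :
    ∀ (L : List String), L.Nodup → L.Pairwise (fun a b => uaKey a < uaKey b) →
    x ∈ L → x ∉ p →
    PySem.List.insertBy (fun a b => decide (uaKey a < uaKey b)) x
        (L.filter (fun a => decide (a ∈ p)))
      = L.filter (fun a => decide (a ∈ p ∨ a = x)) := by
  intro L
  induction L with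
  | nil => intro _ _ hx; exact absurd hx (by simp)
  | cons a L ih =>
    intro hnd hpw hx hxp
    have hndL : L.Nodup := hnd.of_cons
    have haL : a ∉ L := by simp [List.nodup_cons] at hnd; exact hnd.1
    have hpwL : L.Pairwise (fun a b => uaKey a < uaKey b) := hpw.of_cons
    have hkey : ∀ b ∈ L, uaKey a < uaKey b := fun b hb => List.rel_of_pairwise_cons hpw hb
    by_cases hax : a = x
    · subst hax
      have h1 : (a :: L).filter (fun y => decide (y ∈ p)) = L.filter (fun y => decide (y ∈ p)) := by
        simp [hxp]
      rw [h1, insertBy_front _ _ _ (by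
        intro y hy
        have hyL : y ∈ L := List.mem_of_mem_filter hy
        simp [hkey y hyL])]
      have h2 : L.filter (fun y => decide (y ∈ p ∨ y = a)) = L.filter (fun y => decide (y ∈ p)) := by
        apply List.filter_congr
        intro y hy
        have : y ≠ a := fun h => haL (h ▸ hy)
        simp [this]
      rw [List.filter_cons_of_pos (by simp)]
      exact congrArg _ h2.symm
    · have hxL : x ∈ L := by cases hx with
        | head => exact absurd rfl hax
        | tail _ h => exact h
      have hax' : decide (uaKey x < uaKey a) = false := by
        have := hkey x hxL
        simp; omega
      by_cases hap : a ∈ p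
      · rw [List.filter_cons_of_pos (by simp [hap]),
            List.filter_cons_of_pos (by simp [hap])]
        rw [insertBy_cons, if_neg (by simp [hax'])]
        rw [ih hndL hpwL hxL hxp]
      · rw [List.filter_cons_of_neg (by simp [hap]),
            List.filter_cons_of_neg (by simp [hap, hax])]
        exact ih hndL hpwL hxL hxp

-- the insertion sort of a duplicate-free list bucketed by the table
theorem sort_buckets :
    ∀ (p : List String), p.Nodup →
    p.foldl (fun acc x => PySem.List.insertBy (fun a b => decide (uaKey a < uaKey b)) x acc) [] =
      ATTRIBUTE_ORDER.filter (fun a => decide (a ∈ p))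
        ++ p.filter (fun a => decide (a ∉ ATTRIBUTE_ORDER)) := by
  intro p
  induction p using List.reverseRecOn with
  | nil => simp
  | append_singleton p x ih =>
    intro hnd
    have hndp : p.Nodup := hnd.sublist (by simp)
    have hxp : x ∉ p := by
      have := List.disjoint_of_nodup_append hnd
      intro h; exact this h (by simp)
    rw [List.foldl_append, List.foldl_cons, List.foldl_nil, ih hndp]
    by_cases hx : x ∈ ATTRIBUTE_ORDER
    · rw [insertBy_append _ _ _ _ (by
        intro u hu
        have hu2 := List.of_mem_filter hu
        simp only [decide_eq_true_eq] at hu2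
        have h999 : uaKey u = 999 := key_of_not_mem hu2
        have := key_lt_of_mem x hx
        simp [h999]; omega)]
      rw [insertBy_filter p x ATTRIBUTE_ORDER ord_nodup ord_pairwise hx hxp]
      have hU : (p ++ [x]).filter (fun a => decide (a ∉ ATTRIBUTE_ORDER))
          = p.filter (fun a => decide (a ∉ ATTRIBUTE_ORDER)) := by
        simp [List.filter_append, hx]
      have hK : ATTRIBUTE_ORDER.filter (fun a => decide (a ∈ p ∨ a = x))
          = ATTRIBUTE_ORDER.filter (fun a => decide (a ∈ p ++ [x])) := by
        apply List.filter_congr; intro a _; simp [List.mem_append]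
      rw [hU, ← hK]
    · rw [PySem.List.insertBy_of_forall_not_before _ _ _ (by
        intro y hy
        rcases List.mem_append.mp hy with hyK | hyU
        · have hyO := List.mem_of_mem_filter hyK
          have := key_lt_of_mem y hyO
          have hx999 : uaKey x = 999 := key_of_not_mem hx
          simp [hx999]; omega
        · have hyU2 := List.of_mem_filter hyU
          simp only [decide_eq_true_eq] at hyU2
          have := key_of_not_mem hyU2
          have hx999 : uaKey x = 999 := key_of_not_mem hx
          simp [this, hx999])]
      have hK : ATTRIBUTE_ORDER.filter (fun a => decide (a ∈ p ++ [x]))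
          = ATTRIBUTE_ORDER.filter (fun a => decide (a ∈ p)) := by
        apply List.filter_congr; intro a ha
        have : a ≠ x := fun h => hx (h ▸ ha)
        simp [List.mem_append, this]
      have hU : (p ++ [x]).filter (fun a => decide (a ∉ ATTRIBUTE_ORDER))
          = p.filter (fun a => decide (a ∉ ATTRIBUTE_ORDER)) ++ [x] := by
        simp [List.filter_append, hx]
      rw [hK, hU, List.append_assoc]

-- A's dedup loop computes the same list as the ordered set fold
theorem loopA :
    ∀ (vs : List String) (s : PySem.Set String) (l : List String),
    (∀ a, a ∈ s ↔ a ∈ l) →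
    (vs.foldl uaStep (s, l)).2
    = vs.foldl (fun acc v =>
        if normalize_attribute v ≠ "" then PySem.Set.add acc (normalize_attribute v) else acc) l := by
  intro vs
  induction vs with
  | nil => intro s l _; rfl
  | cons v vs ih =>
    intro s l hinv
    simp only [List.foldl_cons]
    by_cases h1 : normalize_attribute v = ""
    · rw [show uaStep (s, l) v = (s, l) from by simp [uaStep, h1],
        if_neg (by simp [h1])]
      exact ih s l hinv
    · by_cases h2 : normalize_attribute v ∈ s
      · have h2l : normalize_attribute v ∈ l := (hinv _).mp h2
        rw [show uaStep (s, l) v = (s, l) from by simp [uaStep, h2],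
          if_pos h1, PySem.Set.add_of_mem h2l]
        exact ih s l hinv
      · have h2l : normalize_attribute v ∉ l := fun h => h2 ((hinv _).mpr h)
        rw [show uaStep (s, l) v
              = (PySem.Set.add s (normalize_attribute v), l ++ [normalize_attribute v]) from by
            simp [uaStep, h1, h2],
          if_pos h1, PySem.Set.add_of_not_mem h2l]
        apply ih
        intro a
        rw [PySem.Set.mem_add]
        simp [hinv a, or_comm]

-- ===== VERDICT (by name: the statement is the Claim_ definition above) =====
theorem unique_attributes_spec : Claim_equal_unique_attributes := by
  intro values _
  show unique_attributes values = unique_attributes_alt values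
  have hfold := loopA values PySem.Set.empty [] (fun a => by simp [PySem.Set.empty])
  have hM : PySem.List.dedup ((values.map normalize_attribute).filter (fun a => decide (a ≠ "")))
      = values.foldl (fun acc v =>
          if normalize_attribute v ≠ "" then PySem.Set.add acc (normalize_attribute v) else acc) [] := by
    rw [PySem.List.dedup_eq_ofList, PySem.Set.ofList_eq_foldl,
      ← PySem.List.foldl_ite_eq_foldl_filter (p := fun a => a ≠ "") PySem.Set.add
        (values.map normalize_attribute) [],
      List.foldl_map]
  have hnd : (values.foldl (fun acc v =>
      if normalize_attribute v ≠ "" then PySem.Set.add acc (normalize_attribute v) else acc)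
      []).Nodup := by
    rw [← hM, PySem.List.dedup_eq_ofList]
    exact PySem.Set.nodup_ofList _
  unfold unique_attributes unique_attributes_alt
  simp only [hfold, hM]
  rw [PySem.List.sorted_eq_foldl_insertBy]
  exact sort_buckets _ hnd
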